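-- pv_equiv track=rewrite | github.com/HITOfficial/College | WDI/lekcja 4 28.10.2020/zad1.py | convert_oct
-- ===== SOURCE A (Python) =====
-- def convert_oct(number):
--     number_oct = 0
--     power = 0
--     while number > 0:
--         # number_oct = number_oct + number % 2**3 * 10 ** power
--         number_oct = number_oct + (number % 2**16) * 10 ** power # pluło jadem bo kolejność w potęgowaniu
--         number  //= 2**16
--         power += 1
--
--     return number_oct
-- ===== SOURCE B (Python) =====
-- def convert_oct(number):
--     chunks = []
--     while number > 0:
--         chunks.append(number % 2**16)
--         number //= 2**16
--     result = 0
--     for c in reversed(chunks):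
--         result = result * 10 + c
--     return result
-- ===== Notes on version B (the rewrite author's own statement) =====
-- stated objective: alternative
-- what changed: Replaces the single accumulate-with-10**power loop by a two-pass decomposition: first extract the 16-bit chunks into a list, then fold them back with Horner's rule (result*10 + chunk), avoiding the explicit 10**power each step.
import Mathlib
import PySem

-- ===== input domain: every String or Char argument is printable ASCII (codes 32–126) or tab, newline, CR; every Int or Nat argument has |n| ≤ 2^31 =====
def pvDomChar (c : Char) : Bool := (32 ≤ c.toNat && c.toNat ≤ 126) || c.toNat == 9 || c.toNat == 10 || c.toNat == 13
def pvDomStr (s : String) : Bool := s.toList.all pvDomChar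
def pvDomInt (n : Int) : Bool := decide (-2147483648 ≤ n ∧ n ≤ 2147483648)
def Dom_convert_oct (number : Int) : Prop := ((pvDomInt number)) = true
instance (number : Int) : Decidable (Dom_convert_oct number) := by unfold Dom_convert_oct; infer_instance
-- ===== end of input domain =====

-- B replaces A's single accumulate-with-10**power loop by a two-pass decomposition
-- (extract 16-bit chunks, then Horner fold); alternative structure, not claimed faster.


-- ===== PORT A =====
theorem pv_floordiv_toNat_lt (n : Int) (h : 0 < n) :
    (PySem.Int.floordiv n 65536).toNat < n.toNat := by
  rw [PySem.Int.floordiv_eq_ediv_of_pos (by norm_num)]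
  have h1 : n / 65536 < n := Int.ediv_lt_of_lt_mul (by norm_num) (by nlinarith)
  have h2 : 0 ≤ n / 65536 := Int.ediv_nonneg (le_of_lt h) (by norm_num)
  omega

-- while number > 0: number_oct += (number % 2**16) * 10 ** power; number //= 2**16; power += 1
def convert_oct_go (number number_oct : Int) (power : Nat) : Int :=
  if number > 0 then
    convert_oct_go (PySem.Int.floordiv number 65536)
      (number_oct + (PySem.Int.mod number 65536) * 10 ^ power) (power + 1)
  else number_oct
termination_by number.toNat
decreasing_by exact pv_floordiv_toNat_lt _ (by omega)

def convert_oct (number : Int) : Int := convert_oct_go number 0 0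

-- ===== PORT B =====
-- first pass: while number > 0: chunks.append(number % 2**16); number //= 2**16
def convert_oct_chunks (number : Int) : List Int :=
  if number > 0 then
    (PySem.Int.mod number 65536) :: convert_oct_chunks (PySem.Int.floordiv number 65536)
  else []
termination_by number.toNat
decreasing_by exact pv_floordiv_toNat_lt _ (by omega)

-- second pass: Horner fold over reversed chunks
def convert_oct_alt (number : Int) : Int :=
  (convert_oct_chunks number).reverse.foldl (fun r c => r * 10 + c) 0

-- ===== PRECONDITION & SPEC =====
def Spec_convert_oct (number : Int) (out : Int) : Prop := out = convert_oct_alt number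
instance (number : Int) (out : Int) : Decidable (Spec_convert_oct number out) := by unfold Spec_convert_oct; infer_instance

-- ===== CLAIM (what is proved, stated in full; the proofs are below) =====
def Claim_equal_convert_oct : Prop := ∀ (number : Int), Dom_convert_oct number → Spec_convert_oct number (convert_oct number)

-- ===== LEMMAS AND PROOFS =====
theorem convert_oct_alt_pos (n : Int) (h : 0 < n) :
    convert_oct_alt n =
      convert_oct_alt (PySem.Int.floordiv n 65536) * 10 + PySem.Int.mod n 65536 := by
  unfold convert_oct_alt
  rw [convert_oct_chunks]
  simp [h, List.foldl_append]

theorem convert_oct_go_eq (k : Nat) :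
    ∀ (n acc : Int) (p : Nat), n.toNat ≤ k →
      convert_oct_go n acc p = acc + 10 ^ p * convert_oct_alt n := by
  induction k with
  | zero =>
    intro n acc p hk
    have hn : ¬ n > 0 := by omega
    rw [convert_oct_go, convert_oct_alt, convert_oct_chunks]
    simp [hn]
  | succ k ih =>
    intro n acc p hk
    by_cases hn : n > 0
    · rw [convert_oct_go]
      simp only [hn, if_pos]
      rw [ih _ _ _ (by have := pv_floordiv_toNat_lt n hn; omega)]
      rw [convert_oct_alt_pos n hn]
      ring
    · rw [convert_oct_go, convert_oct_alt, convert_oct_chunks]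
      simp [hn]

-- ===== VERDICT (by name: the statement is the Claim_ definition above) =====
theorem convert_oct_spec : Claim_equal_convert_oct := by
  intro number _
  show convert_oct number = convert_oct_alt number
  rw [convert_oct, convert_oct_go_eq number.toNat number 0 0 le_rfl]
  ring
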